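-- pv_equiv track=rewrite | github.com/dadashkarimi/seq2sql | src/smt/decoder/stackdecoder.py | _sub_cal_prob_with_cost
-- ===== SOURCE A (Python) =====
-- def _sub_cal_prob_with_cost(s_len, cvd):
--     insert_flag = False
--     lst = []
--     sub_lst = []
--     for i in range(1, s_len+1):
--         if i not in cvd:
--             insert_flag = True
--         else:
--             insert_flag = False
--             if sub_lst:
--                 lst.append(sub_lst)
--             sub_lst = []
--         if insert_flag:
--             sub_lst.append(i)
--     else:
--         if sub_lst:
--             lst.append(sub_lst)
--     return lst
-- ===== SOURCE B (Python) =====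
-- def _sub_cal_prob_with_cost(s_len, cvd):
--     nums = [i for i in range(1, s_len + 1) if i not in cvd]
--     out = []
--     prev = None
--     for n in nums:
--         if prev is not None and n == prev + 1:
--             out[-1].append(n)
--         else:
--             out.append([n])
--         prev = n
--     return out
-- ===== Notes on version B (the rewrite author's own statement) =====
-- stated objective: simpler
-- what changed: Replaces the insert_flag state machine with flush-on-covered-index by a filter comprehension of non-covered indices followed by an adjacency-grouping pass (new group exactly when the value is not prev+1).
import Mathlib
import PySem

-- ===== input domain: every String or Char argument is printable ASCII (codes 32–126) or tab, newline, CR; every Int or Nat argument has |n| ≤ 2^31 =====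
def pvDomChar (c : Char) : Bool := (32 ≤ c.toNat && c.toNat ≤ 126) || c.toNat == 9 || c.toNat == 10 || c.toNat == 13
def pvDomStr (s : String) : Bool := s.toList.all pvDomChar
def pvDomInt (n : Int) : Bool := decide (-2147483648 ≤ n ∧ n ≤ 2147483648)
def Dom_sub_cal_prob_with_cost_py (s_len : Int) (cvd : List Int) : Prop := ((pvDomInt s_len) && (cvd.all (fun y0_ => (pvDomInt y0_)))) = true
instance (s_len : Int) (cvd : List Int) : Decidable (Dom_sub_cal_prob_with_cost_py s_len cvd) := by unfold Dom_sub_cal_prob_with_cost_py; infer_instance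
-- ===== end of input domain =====

-- B replaces A's insert_flag state machine by a filter comprehension plus an
-- adjacency-grouping pass over the surviving indices (simpler; same cost).

-- ===== PORT A =====
-- loop body of A: state = (insert_flag, lst, sub_lst)
def pvStepA (cvd : List Int) (st : Bool × List (List Int) × List Int) (i : Int) :
    Bool × List (List Int) × List Int :=
  if !(cvd.contains i) then
    -- insert_flag = True; then "if insert_flag: sub_lst.append(i)" fires
    (true, st.2.1, st.2.2 ++ [i])
  else
    -- insert_flag = False; flush sub_lst if truthy; the append does not fire
    (false, (if st.2.2 = [] then st.2.1 else st.2.1 ++ [st.2.2]), [])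

def sub_cal_prob_with_cost_py (s_len : Int) (cvd : List Int) : List (List Int) :=
  let st := (PySem.List.pyRange 1 (s_len + 1) 1).foldl (pvStepA cvd) (false, [], [])
  -- for/else final flush
  if st.2.2 = [] then st.2.1 else st.2.1 ++ [st.2.2]

-- ===== PORT B =====
-- loop body of B: state = (out, prev)
def pvStepB (st : List (List Int) × Option Int) (n : Int) : List (List Int) × Option Int :=
  match st.2 with
  | some v =>
      if n = v + 1 then (st.1.dropLast ++ [st.1.getLastD [] ++ [n]], some n)  -- out[-1].append(n)
      else (st.1 ++ [[n]], some n)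
  | none => (st.1 ++ [[n]], some n)

def sub_cal_prob_with_cost_py_alt (s_len : Int) (cvd : List Int) : List (List Int) :=
  let nums := (PySem.List.pyRange 1 (s_len + 1) 1).filter (fun i => !(cvd.contains i))
  (nums.foldl pvStepB ([], none)).1

-- ===== PRECONDITION & SPEC =====
def Spec_sub_cal_prob_with_cost_py (s_len : Int) (cvd : List Int) (out : List (List Int)) : Prop := out = sub_cal_prob_with_cost_py_alt s_len cvd
instance (s_len : Int) (cvd : List Int) (out : List (List Int)) : Decidable (Spec_sub_cal_prob_with_cost_py s_len cvd out) := by unfold Spec_sub_cal_prob_with_cost_py; infer_instance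

-- ===== CLAIM (what is proved, stated in full; the proofs are below) =====
def Claim_equal_sub_cal_prob_with_cost_py : Prop := ∀ (s_len : Int) (cvd : List Int), Dom_sub_cal_prob_with_cost_py s_len cvd → Spec_sub_cal_prob_with_cost_py s_len cvd (sub_cal_prob_with_cost_py s_len cvd)

-- ===== LEMMAS AND PROOFS =====

-- [a, a+1, …, a+n-1]
def pvInterval (a : Int) : Nat → List Int
  | 0 => []
  | n + 1 => a :: pvInterval (a + 1) n

theorem pvRange_eq_interval_aux : ∀ (n : Nat) (a : Int),
    PySem.List.pyRange a (a + n) 1 = pvInterval a n := by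
  intro n
  induction n with
  | zero => intro a; simp [pvInterval, PySem.List.pyRange_one_eq_nil]
  | succ n ih =>
      intro a
      rw [PySem.List.pyRange_one_cons (by push_cast; omega)]
      have h : a + ((n : Int) + 1) = (a + 1) + (n : Int) := by ring
      push_cast
      rw [h, ih (a + 1)]
      rfl

theorem pvRange_eq_interval (a b : Int) :
    PySem.List.pyRange a b 1 = pvInterval a (b - a).toNat := by
  rcases (by omega : b ≤ a ∨ a < b) with h | h
  · rw [PySem.List.pyRange_one_eq_nil h]
    have : (b - a).toNat = 0 := by omega
    rw [this]; rfl
  · have hb : b = a + ((b - a).toNat : Int) := by omega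
    rw [hb, pvRange_eq_interval_aux]
    congr 1
    omega

-- the common recursive description of the grouped runs, with open run `sub`
def pvW (cvd : List Int) : List Int → Int → Nat → List (List Int)
  | sub, _, 0 => if sub = [] then [] else [sub]
  | sub, a, n + 1 =>
      if !(cvd.contains a) then pvW cvd (sub ++ [a]) (a + 1) n
      else (if sub = [] then [] else [sub]) ++ pvW cvd [] (a + 1) n

theorem lemA (cvd : List Int) : ∀ (n : Nat) (a : Int) (flag : Bool) (lst : List (List Int)) (sub : List Int),
    (let st := (pvInterval a n).foldl (pvStepA cvd) (flag, lst, sub);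
      if st.2.2 = [] then st.2.1 else st.2.1 ++ [st.2.2]) = lst ++ pvW cvd sub a n := by
  intro n
  induction n with
  | zero =>
      intro a flag lst sub
      simp only [pvInterval, List.foldl_nil, pvW]
      split_ifs <;> simp_all
  | succ n ih =>
      intro a flag lst sub
      simp only [pvInterval, List.foldl_cons, pvW, pvStepA]
      by_cases hc : cvd.contains a
      · simp only [hc, Bool.not_true, Bool.false_eq_true, if_false]
        rw [ih]
        split_ifs <;> simp
      · simp only [hc, Bool.not_false, if_true]
        rw [ih]

theorem pvFlush (out : List (List Int)) (h : out ≠ [] → out.getLastD [] ≠ []) (X : List (List Int)) :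
    out.dropLast ++ ((if out.getLastD [] = [] then [] else [out.getLastD []]) ++ X) = out ++ X := by
  rcases List.eq_nil_or_concat out with rfl | ⟨ys, y, rfl⟩
  · simp
  · simp only [List.concat_eq_append] at h ⊢
    have hy : y ≠ [] := by simpa using h (by simp)
    simp [hy]

theorem lemB (cvd : List Int) : ∀ (n : Nat) (a : Int) (out : List (List Int)) (prev : Option Int),
    (∀ v, prev = some v → v < a) →
    (out ≠ [] → out.getLastD [] ≠ []) →
    (((pvInterval a n).filter (fun i => !(cvd.contains i))).foldl pvStepB (out, prev)).1 =
      if prev = some (a - 1) then out.dropLast ++ pvW cvd (out.getLastD []) a n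
      else out ++ pvW cvd [] a n := by
  intro n
  induction n with
  | zero =>
      intro a out prev _ hlast
      simp only [pvInterval, List.filter_nil, List.foldl_nil, pvW]
      rcases eq_or_ne prev (some (a - 1)) with h1 | h1
      · rw [if_pos h1]
        simpa using (pvFlush out hlast []).symm
      · rw [if_neg h1]
        simp
  | succ n ih =>
      intro a out prev hprev hlast
      have hne : prev ≠ some a := by
        intro h; exact absurd (hprev a h) (lt_irrefl a)
      simp only [pvInterval, List.filter_cons]
      by_cases hc : cvd.contains a
      · -- a is covered: filtered out; run closes on the W side
        simp only [hc, Bool.not_true, Bool.false_eq_true, if_false]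
        rw [ih (a + 1) out prev (by intro v hv; have := hprev v hv; omega) hlast]
        have h1 : a + 1 - 1 = a := by ring
        rw [h1, if_neg hne]
        rcases eq_or_ne prev (some (a - 1)) with h2 | h2
        · rw [if_pos h2]
          simp only [pvW, hc, Bool.not_true, Bool.false_eq_true, if_false]
          exact (pvFlush out hlast _).symm
        · rw [if_neg h2]
          simp only [pvW, hc, Bool.not_true, Bool.false_eq_true, if_false]
          simp
      · -- a survives the filter
        simp only [hc, Bool.not_false, if_true, List.foldl_cons]
        by_cases hp : prev = some (a - 1)
        · -- the step merges a into the last group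
          have hstep : pvStepB (out, prev) a =
              (out.dropLast ++ [out.getLastD [] ++ [a]], some a) := by
            simp [pvStepB, hp]
          rw [hstep,
            ih (a + 1) _ (some a) (by intro v hv; simp at hv; omega)
              (by intro _; simp)]
          have h1 : (a + 1 - 1 : Int) = a := by ring
          simp only [h1, reduceIte]
          simp only [List.dropLast_concat, List.getLastD_concat]
          simp only [pvW, hc, Bool.not_false, if_true, hp]
        · -- the step opens a new group
          have hstep : pvStepB (out, prev) a = (out ++ [[a]], some a) := by
            cases prev with
            | none => simp [pvStepB]
            | some v =>
                have hv : a ≠ v + 1 := by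
                  intro h; apply hp; rw [h]; congr 1; ring
                simp [pvStepB, hv]
          rw [hstep,
            ih (a + 1) _ (some a) (by intro v hv; simp at hv; omega)
              (by intro _; simp)]
          have h1 : (a + 1 - 1 : Int) = a := by ring
          simp only [h1, reduceIte]
          simp only [List.dropLast_concat, List.getLastD_concat]
          simp only [hp, reduceIte]
          simp only [pvW, hc, Bool.not_false, if_true]
          simp

-- ===== VERDICT (by name: the statement is the Claim_ definition above) =====
theorem sub_cal_prob_with_cost_py_spec : Claim_equal_sub_cal_prob_with_cost_py := by
  intro s_len cvd _
  show sub_cal_prob_with_cost_py s_len cvd = sub_cal_prob_with_cost_py_alt s_len cvd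
  unfold sub_cal_prob_with_cost_py sub_cal_prob_with_cost_py_alt
  rw [pvRange_eq_interval]
  have hA := lemA cvd ((s_len + 1 - 1).toNat) 1 false [] []
  have hB := lemB cvd ((s_len + 1 - 1).toNat) 1 [] none
    (by intro v hv; cases hv) (by intro h; cases h rfl)
  simp only at hA
  rw [hA, hB]
  simp
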